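-- pv_equiv track=rewrite | github.com/GDonoghue0/JaneStreetPuzzles | July2020.py | tern2dec
-- ===== SOURCE A (Python) =====
-- def tern2dec(num):
--     dec = 0
--     j = len(num)-1
--     for i in num:
--         if i == 'T':
--             i = -1
--         dec += int(i)*4**j
--         j -= 1
--     return dec
-- ===== SOURCE B (Python) =====
-- def tern2dec(num):
--     dec = 0
--     for it in num:
--         dec = dec * 4 + (-1 if it == 'T' else int(it))
--     return dec
-- ===== Notes on version B (the rewrite author's own statement) =====
-- stated objective: simpler
-- what changed: Replaces the positional sum with a position counter and 4**j exponentiation by Horner's rule (dec = dec*4 + digit), dropping the counter and the power computation.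
import Mathlib
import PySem

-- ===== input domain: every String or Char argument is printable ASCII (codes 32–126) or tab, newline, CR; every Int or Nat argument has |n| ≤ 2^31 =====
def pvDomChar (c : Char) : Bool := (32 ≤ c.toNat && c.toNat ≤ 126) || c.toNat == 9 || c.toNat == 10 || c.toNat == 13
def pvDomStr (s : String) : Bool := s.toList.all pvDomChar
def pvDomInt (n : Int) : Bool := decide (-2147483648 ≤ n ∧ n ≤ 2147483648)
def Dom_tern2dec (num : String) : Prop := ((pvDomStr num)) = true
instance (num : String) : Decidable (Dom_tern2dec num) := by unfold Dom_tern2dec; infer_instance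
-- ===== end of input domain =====

-- B replaces the positional 4**j sum by Horner's rule (dec = dec*4 + digit): simpler, no position counter or exponentiation.


-- ===== PORT A =====
-- '-1 if c == 'T', else int(c)'; int(c) raises on non-digit characters — those inputs are excluded by Pre_, getD 0 is never reached there
def pvCharVal (c : Char) : Int :=
  if c = 'T' then -1 else (PySem.Int.ofStr? (String.ofList [c])).getD 0

def tern2dec (num : String) : Int :=
  (num.toList.foldl (fun (s : Int × Int) c => (s.1 + pvCharVal c * 4 ^ s.2.toNat, s.2 - 1))
    (0, (num.toList.length : Int) - 1)).1

-- ===== PORT B =====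
def tern2dec_alt (num : String) : Int :=
  num.toList.foldl (fun dec c => dec * 4 + pvCharVal c) 0

-- ===== PRECONDITION & SPEC =====
-- Pre_ excludes exactly the inputs where Python's int(i) raises ValueError: any character other than 'T' or a decimal digit.
def Pre_tern2dec (num : String) : Prop :=
  num.toList.all (fun c => c == 'T' || ('0' ≤ c && c ≤ '9')) = true
instance (num : String) : Decidable (Pre_tern2dec num) := by unfold Pre_tern2dec; infer_instance
def pvWitness_tern2dec : String := "T012T"

def Spec_tern2dec (num : String) (out : Int) : Prop := out = tern2dec_alt num
instance (num : String) (out : Int) : Decidable (Spec_tern2dec num out) := by unfold Spec_tern2dec; infer_instance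

-- ===== CLAIM (what is proved, stated in full; the proofs are below) =====
def Claim_equal_tern2dec : Prop := ∀ (num : String), Dom_tern2dec num → Pre_tern2dec num → Spec_tern2dec num (tern2dec num)

-- ===== LEMMAS AND PROOFS =====

-- Horner fold on a prefix: running accumulator scales by 4^length of the rest.
theorem pv_horner_shift (l : List Char) (d : Int) :
    l.foldl (fun dec c => dec * 4 + pvCharVal c) d
      = d * 4 ^ l.length + l.foldl (fun dec c => dec * 4 + pvCharVal c) 0 := by
  induction l generalizing d with
  | nil => simp
  | cons c l ih =>
    simp only [List.foldl_cons, List.length_cons]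
    rw [ih (d * 4 + pvCharVal c), ih (0 * 4 + pvCharVal c)]
    ring

-- A's positional fold started at j = length - 1 equals d plus B's Horner value.
theorem pv_pos_eq_horner (l : List Char) (d : Int) :
    (l.foldl (fun (s : Int × Int) c => (s.1 + pvCharVal c * 4 ^ s.2.toNat, s.2 - 1))
      (d, (l.length : Int) - 1)).1
      = d + l.foldl (fun dec c => dec * 4 + pvCharVal c) 0 := by
  induction l generalizing d with
  | nil => simp
  | cons c l ih =>
    simp only [List.foldl_cons, List.length_cons]
    have hj : ((((l.length + 1 : Nat) : Int) - 1)).toNat = l.length := by omega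
    have hj2 : (((l.length + 1 : Nat) : Int) - 1) - 1 = ((l.length : Nat) : Int) - 1 := by
      push_cast; ring
    rw [hj, hj2, ih (d + pvCharVal c * 4 ^ l.length),
      pv_horner_shift l (0 * 4 + pvCharVal c)]
    ring

-- ===== VERDICT (by name: the statement is the Claim_ definition above) =====
theorem tern2dec_spec : Claim_equal_tern2dec := by
  intro num _ _
  unfold Spec_tern2dec tern2dec tern2dec_alt
  exact pv_pos_eq_horner num.toList 0 |>.trans (by ring)
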